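-- pv_equiv track=rewrite | github.com/m0mosenpai/dsagrind | aoc_2020/11_seating_system.py | part_2
-- ===== SOURCE A (Python) =====
-- from copy import deepcopy
--
-- def fill_seat(row, col, seats):
-- 	seats[row][col] = "#"
--
-- def empty_seat(row, col, seats):
-- 	seats[row][col] = "L"
--
-- def visible_seats(row, col, seats):
--     directions = {
--         'NW': lambda row, col, delta: (row - delta, col - delta),
--         'N': lambda row, col, delta: (row - delta, col),
--         'NE': lambda row, col, delta: (row - delta, col + delta),
--         'W': lambda row, col, delta: (row, col - delta),
--         'E': lambda row, col, delta: (row, col + delta),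
--         'SW': lambda row, col, delta: (row + delta, col - delta),
--         'S': lambda row, col, delta: (row + delta, col),
--         'SE': lambda row, col, delta: (row + delta, col + delta),
--     }
--
--     def is_valid(row, col):
--         max_col = len(seats[0])
--         max_row = len(seats)
--
--         return row in range(0, max_row) and col in range(0, max_col)
--
--     visible = []
--     delta = 1
--     while dirs := list(directions):
--         for d in dirs:
--             nr, nc = directions[d](row, col, delta)
--             if not is_valid(nr, nc):
--                 del directions[d]
--             elif seats[nr][nc] == 'L':
--                 del directions[d]
--             elif seats[nr][nc] == '#':
--                 visible.append((nr, nc))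
--                 del directions[d]
--         delta += 1
--     return visible
--
-- def part_2(data_list):
-- 	data_list_tmp = deepcopy(data_list)
--
-- 	total_occupied_seats = 0
-- 	while True:
-- 		state_changed = False
-- 		for rownum, row in enumerate(data_list):
-- 			for colnum, col in enumerate(row):
-- 				viscount = len(visible_seats(rownum, colnum, data_list))
-- 				if col == "L" and viscount == 0:
-- 					fill_seat(rownum, colnum, data_list_tmp)
-- 					total_occupied_seats += 1
-- 					state_changed = True
-- 				elif col == "#" and viscount >= 5:
-- 					empty_seat(rownum, colnum, data_list_tmp)
-- 					total_occupied_seats -= 1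
-- 					state_changed = True
--
-- 		data_list = deepcopy(data_list_tmp)
-- 		if not state_changed:
-- 			break
--
-- 	return total_occupied_seats
-- ===== SOURCE B (Python) =====
-- def part_2(data_list):
--     R = len(data_list)
--     C = len(data_list[0]) if data_list else 0
--     seat = lambda r, c: data_list[r][c] in ("L", "#")
--     seatpos = [(r, c) for r in range(R) for c in range(len(data_list[r])) if seat(r, c)]
--     seatset = set(seatpos)
--     dirs = ((-1, -1), (-1, 0), (-1, 1), (0, -1), (0, 1), (1, -1), (1, 0), (1, 1))
--     # static line-of-sight neighbour lists: first seat in each of the 8 directions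
--     nbrs = []
--     for (r, c) in seatpos:
--         lst = []
--         for dr, dc in dirs:
--             nr, nc = r + dr, c + dc
--             while 0 <= nr < R and 0 <= nc < C:
--                 if (nr, nc) in seatset:
--                     lst.append((nr, nc))
--                     break
--                 nr += dr
--                 nc += dc
--         nbrs.append(lst)
--     occ = [p for p in seatpos if data_list[p[0]][p[1]] == "#"]
--     init = len(occ)
--     while True:
--         occset = set(occ)
--         new = []
--         for p, ns in zip(seatpos, nbrs):
--             v = sum(1 for q in ns if q in occset)
--             if (p in occset and v < 5) or (p not in occset and v == 0):
--                 new.append(p)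
--         if new == occ:
--             break
--         occ = new
--     return len(occ) - init
-- ===== Notes on version B (the rewrite author's own statement) =====
-- stated objective: faster
-- what changed: B precomputes each seat's static list of first-visible seats in the 8 directions once, then iterates synchronous occupancy updates over a list of occupied positions and returns final-minus-initial occupied count, instead of A re-walking every ray from every cell (via a dict of direction lambdas) in every round and mutating a grid copy with a running counter.
import Mathlib
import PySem

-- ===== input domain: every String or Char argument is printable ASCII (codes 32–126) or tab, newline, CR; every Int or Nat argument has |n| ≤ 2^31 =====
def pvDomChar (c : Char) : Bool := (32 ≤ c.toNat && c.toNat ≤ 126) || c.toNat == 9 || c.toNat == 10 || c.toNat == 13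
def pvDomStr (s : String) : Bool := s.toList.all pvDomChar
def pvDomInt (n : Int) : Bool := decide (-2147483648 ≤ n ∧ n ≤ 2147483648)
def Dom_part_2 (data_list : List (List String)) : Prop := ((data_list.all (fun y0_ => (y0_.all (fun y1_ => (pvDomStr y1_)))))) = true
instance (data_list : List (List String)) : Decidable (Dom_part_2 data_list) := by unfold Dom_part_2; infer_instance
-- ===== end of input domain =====

-- B precomputes each seat's static line-of-sight neighbour list once and then iterates occupancy
-- as a list of occupied seat positions, returning final-minus-initial occupied count (= A's running total);
-- equivalence is about the return value only (A reassigns its local, the caller's list is not mutated).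

-- ===== PORT A =====
-- grid cell access g[r][c]; in every use the indices were range-checked, so pyGetD is exact
def pvCell (g : List (List String)) (r c : Int) : String :=
  PySem.List.pyGetD (PySem.List.pyGetD g r []) c ""

-- g[r][c] = v  (indices always in range where used)
def pvSetCell (g : List (List String)) (r c : Int) (v : String) : List (List String) :=
  PySem.List.pySetD g r (PySem.List.pySetD (PySem.List.pyGetD g r []) c v)

-- the 'directions' dict of lambdas, modelled by its key list; a lambda application is pvDirDelta
def pvDirList : List String := ["NW", "N", "NE", "W", "E", "SW", "S", "SE"]

def pvDirDelta (d : String) (row col delta : Int) : Int × Int :=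
  if d = "NW" then (row - delta, col - delta)
  else if d = "N" then (row - delta, col)
  else if d = "NE" then (row - delta, col + delta)
  else if d = "W" then (row, col - delta)
  else if d = "E" then (row, col + delta)
  else if d = "SW" then (row + delta, col - delta)
  else if d = "S" then (row + delta, col)
  else (row + delta, col + delta)

-- is_valid: row in range(0, len(seats)) and col in range(0, len(seats[0]))
def pvIsValid (seats : List (List String)) (r c : Int) : Bool :=
  decide (0 ≤ r ∧ r < (seats.length : Int)) &&
  decide (0 ≤ c ∧ c < (((PySem.List.pyGetD seats 0 []).length : Int)))

-- one 'for d in dirs' body: state is (directions dict as key list, visible)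
def pvVisStep (seats : List (List String)) (row col delta : Int)
    (st : List String × List (Int × Int)) (d : String) : List String × List (Int × Int) :=
  let nr := (pvDirDelta d row col delta).1
  let nc := (pvDirDelta d row col delta).2
  if ¬ (pvIsValid seats nr nc = true) then (st.1.erase d, st.2)
  else if pvCell seats nr nc = "L" then (st.1.erase d, st.2)
  else if pvCell seats nr nc = "#" then (st.1.erase d, st.2 ++ [(nr, nc)])
  else st

-- 'while dirs := list(directions): … delta += 1'; fuel only makes the loop total
def pvVisLoop (seats : List (List String)) (row col : Int) :
    Nat → List String → Int → List (Int × Int) → List (Int × Int)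
  | 0, _, _, vis => vis
  | fuel + 1, dirs, delta, vis =>
    if dirs = [] then vis
    else
      let st := dirs.foldl (pvVisStep seats row col delta) (dirs, vis)
      pvVisLoop seats row col fuel st.1 (delta + 1) st.2

def visible_seatsA (seats : List (List String)) (row col : Int) : List (Int × Int) :=
  pvVisLoop seats row col (seats.length + (PySem.List.pyGetD seats 0 []).length + 2) pvDirList 1 []

-- viscount = len(visible_seats(rownum, colnum, data_list))
def pvVC (cur : List (List String)) (r c : Int) : Int :=
  ((visible_seatsA cur r c).length : Int)

-- one full pass over the grid: state (data_list_tmp, total_occupied_seats, state_changed)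
def pvPassA (cur : List (List String)) (st0 : List (List String) × Int × Bool) :
    List (List String) × Int × Bool :=
  (PySem.List.enumerate cur).foldl (fun st p =>
    (PySem.List.enumerate p.2).foldl (fun st q =>
      let viscount : Int := pvVC cur p.1 q.1
      if q.2 = "L" ∧ viscount = 0 then (pvSetCell st.1 p.1 q.1 "#", st.2.1 + 1, true)
      else if q.2 = "#" ∧ viscount ≥ 5 then (pvSetCell st.1 p.1 q.1 "L", st.2.1 - 1, true)
      else st) st) st0

def pvCells (g : List (List String)) : Nat := (g.map List.length).sum

-- 'while True: … if not state_changed: break'; fuel only makes the loop total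
def pvLoopA : Nat → List (List String) → List (List String) → Int → Int
  | 0, _, _, total => total
  | fuel + 1, cur, tmp, total =>
    let st := pvPassA cur (tmp, total, false)
    if st.2.2 then pvLoopA fuel st.1 st.1 st.2.1 else st.2.1

def part_2 (data_list : List (List String)) : Int :=
  pvLoopA (2 ^ pvCells data_list + 1) data_list data_list 0

-- ===== PORT B =====
def pvDirPairs : List (Int × Int) :=
  [(-1, -1), (-1, 0), (-1, 1), (0, -1), (0, 1), (1, -1), (1, 0), (1, 1)]

-- the 'while 0 <= nr < R and 0 <= nc < C' walk; fuel only makes the loop total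
def pvRayB (seatset : List (Int × Int)) (R C dr dc : Int) :
    Nat → Int → Int → Option (Int × Int)
  | 0, _, _ => none
  | fuel + 1, nr, nc =>
    if decide (0 ≤ nr ∧ nr < R ∧ 0 ≤ nc ∧ nc < C) then
      if PySem.Set.contains seatset (nr, nc) then some (nr, nc)
      else pvRayB seatset R C dr dc fuel (nr + dr) (nc + dc)
    else none

def pvNbr (seatset : List (Int × Int)) (R C : Int) (p : Int × Int) : List (Int × Int) :=
  pvDirPairs.foldl (fun lst d =>
    match pvRayB seatset R C d.1 d.2 ((R + C).toNat + 2) (p.1 + d.1) (p.2 + d.2) with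
    | some q => lst ++ [q]
    | none => lst) []

def pvStepB (seatpos : List (Int × Int)) (nbrs : List (List (Int × Int)))
    (occ : List (Int × Int)) : List (Int × Int) :=
  let occset : PySem.Set (Int × Int) := PySem.Set.ofList occ
  (seatpos.zip nbrs).foldl (fun new pn =>
    let v : Int := ((pn.2.countP (fun q => PySem.Set.contains occset q)) : Int)
    if (PySem.Set.contains occset pn.1 ∧ v < 5) ∨
       (¬ (PySem.Set.contains occset pn.1 = true) ∧ v = 0) then new ++ [pn.1] else new) []

-- 'while True: … if new == occ: break'; fuel only makes the loop total
def pvLoopB (seatpos : List (Int × Int)) (nbrs : List (List (Int × Int))) :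
    Nat → List (Int × Int) → List (Int × Int)
  | 0, occ => occ
  | fuel + 1, occ =>
    let new := pvStepB seatpos nbrs occ
    if new = occ then occ else pvLoopB seatpos nbrs fuel new

def pvSeatPos (data_list : List (List String)) (R : Int) : List (Int × Int) :=
  (PySem.List.pyRange 0 R 1).flatMap (fun r =>
    ((PySem.List.pyRange 0 (PySem.List.len (PySem.List.pyGetD data_list r [])) 1).filter
      (fun c => decide (pvCell data_list r c = "L" ∨ pvCell data_list r c = "#"))).map
      (fun c => (r, c)))

def part_2_alt (data_list : List (List String)) : Int :=
  let R : Int := (data_list.length : Int)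
  let C : Int := match data_list with | [] => 0 | row :: _ => (row.length : Int)
  let seatpos := pvSeatPos data_list R
  let seatset : PySem.Set (Int × Int) := PySem.Set.ofList seatpos
  let nbrs := seatpos.map (pvNbr seatset R C)
  let occ0 := seatpos.filter (fun p => decide (pvCell data_list p.1 p.2 = "#"))
  let fin := pvLoopB seatpos nbrs (2 ^ pvCells data_list + 1) occ0
  (fin.length : Int) - (occ0.length : Int)

-- ===== PRECONDITION & SPEC =====
-- Pre_ excludes grids in which some row is shorter than the first row: A's line-of-sight scan
-- indexes every cell of the first row's width in each row it crosses, so it raises IndexError there.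
def Pre_part_2 (data_list : List (List String)) : Prop :=
  ∀ row ∈ data_list, (data_list.headD []).length ≤ row.length
instance (data_list : List (List String)) : Decidable (Pre_part_2 data_list) := by
  unfold Pre_part_2; infer_instance

def pvWitness_part_2 : List (List String) := [["L", ".", "#"], ["#", "L", "."]]

def Spec_part_2 (data_list : List (List String)) (out : Int) : Prop := out = part_2_alt data_list
instance (data_list : List (List String)) (out : Int) : Decidable (Spec_part_2 data_list out) := by
  unfold Spec_part_2; infer_instance

-- ===== CLAIM (what is proved, stated in full; the proofs are below) =====
def Claim_equal_part_2 : Prop := ∀ (data_list : List (List String)), Dom_part_2 data_list → Pre_part_2 data_list → Spec_part_2 data_list (part_2 data_list)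

-- ===== LEMMAS AND PROOFS =====

-- ---------- proof-side definitions ----------

def pvR (G : List (List String)) : Int := (G.length : Int)
def pvC (G : List (List String)) : Int := ((G.headD []).length : Int)
abbrev pvSeat (G : List (List String)) (r c : Int) : Prop :=
  pvCell G r c = "L" ∨ pvCell G r c = "#"
def pvSP (G : List (List String)) : List (Int × Int) := pvSeatPos G (pvR G)
def pvW (G : List (List String)) (r : Int) : Int := ((PySem.List.pyGetD G r []).length : Int)
def pvOcc (G g : List (List String)) : List (Int × Int) :=
  (pvSP G).filter (fun p => decide (pvCell g p.1 p.2 = "#"))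
def pvNb (G : List (List String)) : List (List (Int × Int)) :=
  (pvSP G).map (pvNbr (PySem.Set.ofList (pvSP G)) (pvR G) (pvC G))

-- skeleton invariant relating a reachable grid g to the original G
def pvSk (G g : List (List String)) : Prop :=
  g.map List.length = G.map List.length ∧
  ∀ r c : Int, 0 ≤ r → r < pvR G → 0 ≤ c → c < pvW G r →
    (¬ pvSeat G r c → pvCell g r c = pvCell G r c) ∧
    (pvSeat G r c → pvCell g r c = "L" ∨ pvCell g r c = "#")

-- A's per-direction ray, delta-indexed (proof-side reading of one direction of visible_seats)
def rayA (g : List (List String)) (row col : Int) (d : String) : Nat → Int → Option (Int × Int)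
  | 0, _ => none
  | fuel + 1, delta =>
    let nr := (pvDirDelta d row col delta).1
    let nc := (pvDirDelta d row col delta).2
    if ¬ (pvIsValid g nr nc = true) then none
    else if pvCell g nr nc = "L" then none
    else if pvCell g nr nc = "#" then some (nr, nc)
    else rayA g row col d fuel (delta + 1)

def nCell (g : List (List String)) (r c : Int) (x : String) : String :=
  if x = "L" ∧ pvVC g r c = 0 then "#" else if x = "#" ∧ pvVC g r c ≥ 5 then "L" else x
def dOcc (g : List (List String)) (r c : Int) (x : String) : Int :=
  if x = "L" ∧ pvVC g r c = 0 then 1 else if x = "#" ∧ pvVC g r c ≥ 5 then -1 else 0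
def nRow (g : List (List String)) (r : Int) (row : List String) : List String :=
  (PySem.List.enumerate row).map (fun q => nCell g r q.1 q.2)
def gStep (g : List (List String)) : List (List String) :=
  (PySem.List.enumerate g).map (fun p => nRow g p.1 p.2)
def rowDelta (g : List (List String)) (r : Int) (row : List String) : Int :=
  ((PySem.List.enumerate row).map (fun q => dOcc g r q.1 q.2)).sum
def gDelta (g : List (List String)) : Int :=
  ((PySem.List.enumerate g).map (fun p => rowDelta g p.1 p.2)).sum
def rowCh (g : List (List String)) (r : Int) (row : List String) : Bool :=
  (PySem.List.enumerate row).any (fun q => decide (nCell g r q.1 q.2 ≠ q.2))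
def gCh (g : List (List String)) : Bool :=
  (PySem.List.enumerate g).any (fun p => rowCh g p.1 p.2)

-- the two loop bodies of pvPassA, named
def pvRowFn (g : List (List String)) (r : Int) :
    (List String × Int × Bool) → (Int × String) → (List String × Int × Bool) :=
  fun st q =>
    if q.2 = "L" ∧ pvVC g r q.1 = 0 then (PySem.List.pySetD st.1 q.1 "#", st.2.1 + 1, true)
    else if q.2 = "#" ∧ pvVC g r q.1 ≥ 5 then (PySem.List.pySetD st.1 q.1 "L", st.2.1 - 1, true)
    else st

def pvInner (g : List (List String)) (r : Int) :
    (List (List String) × Int × Bool) → (Int × String) → (List (List String) × Int × Bool) :=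
  fun st q =>
    if q.2 = "L" ∧ pvVC g r q.1 = 0 then (pvSetCell st.1 r q.1 "#", st.2.1 + 1, true)
    else if q.2 = "#" ∧ pvVC g r q.1 ≥ 5 then (pvSetCell st.1 r q.1 "L", st.2.1 - 1, true)
    else st

def indOcc (s : String) : Int := if s = "#" then 1 else 0

theorem setD_int {α : Type} (tmp : List α) {r : Int} (h0 : 0 ≤ r) (hlt : r.toNat < tmp.length)
    (v : α) : PySem.List.pySetD tmp r v = tmp.set r.toNat v := by
  have : r = ((r.toNat : Nat) : Int) := by omega
  rw [this, PySem.List.pySetD, PySem.List.pySet?_natCast _ _ _ hlt, Option.getD_some]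
  rw [Int.toNat_natCast]

theorem getD_int {α : Type} (tmp : List α) {r : Int} (h0 : 0 ≤ r) (d : α) :
    PySem.List.pyGetD tmp r d = tmp.getD r.toNat d := PySem.List.pyGetD_of_nonneg tmp d h0


-- ---------- basic bridges ----------

theorem passA_eq_inner (cur : List (List String)) (st0 : List (List String) × Int × Bool) :
    pvPassA cur st0 = (PySem.List.enumerate cur).foldl
      (fun st p => (PySem.List.enumerate p.2).foldl (pvInner cur p.1) st) st0 := by
  rfl

theorem sk_refl (G : List (List String)) : pvSk G G := by exact ⟨rfl, fun r c _ _ _ _ => ⟨fun _ => rfl, fun h => h⟩⟩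

theorem sk_len {G g : List (List String)} (h : pvSk G g) : g.length = G.length := by have := congrArg List.length h.1; simpa using this

theorem sk_row_len {G g : List (List String)} (h : pvSk G g)
    (r : Nat) (hr : r < g.length) : (g.getD r []).length = (G.getD r []).length := by
  have hlen : g.length = G.length := sk_len h
  have h1 : (g.map List.length)[r]? = (G.map List.length)[r]? := by rw [h.1]
  rw [List.getElem?_map, List.getElem?_map] at h1
  have hrG : r < G.length := hlen ▸ hr
  rw [List.getElem?_eq_getElem hr, List.getElem?_eq_getElem hrG] at h1
  simp only [Option.map_some, Option.some_inj] at h1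
  rw [List.getD_eq_getElem g [] hr, List.getD_eq_getElem G [] hrG]
  omega

theorem width_ge {G : List (List String)} (hPre : Pre_part_2 G) {r : Int}
    (h0 : 0 ≤ r) (hR : r < pvR G) : pvC G ≤ pvW G r := by
  have hrn : r.toNat < G.length := by simp only [pvR] at hR; omega
  have := hPre G[r.toNat] (List.getElem_mem hrn)
  simp only [pvW, pvC, getD_int G h0, List.getD_eq_getElem G [] hrn]
  omega

theorem sk_head_len {G g : List (List String)} (h : pvSk G g) :
    ((PySem.List.pyGetD g 0 []).length : Int) = pvC G := by 
  have hlen : g.length = G.length := sk_len h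
  show ((PySem.List.pyGetD g ((0:Nat):Int) []).length : Int) = _
  rw [PySem.List.pyGetD_natCast]
  cases g with
  | nil =>
    cases G with
    | nil => simp [pvC]
    | cons a t => simp at hlen
  | cons a t =>
    cases G with
    | nil => simp at hlen
    | cons b u =>
      have := congrArg (fun l => l.headD 0) h.1
      simp [pvC] at this ⊢
      omega
  

theorem isValid_eq {G g : List (List String)} (h : pvSk G g) (r c : Int) :
    pvIsValid g r c = decide (0 ≤ r ∧ r < pvR G ∧ 0 ≤ c ∧ c < pvC G) := by 
  have h1 : (g.length : Int) = pvR G := by have := sk_len h; simp [pvR, this]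
  have h2 := sk_head_len h
  simp only [pvIsValid, h1, h2]
  rcases Decidable.em (0 ≤ r ∧ r < pvR G) with h3 | h3 <;>
    rcases Decidable.em (0 ≤ c ∧ c < pvC G) with h4 | h4 <;>
      simp [h3, h4]
  

theorem mem_SP (G : List (List String)) (p : Int × Int) :
    p ∈ pvSP G ↔ 0 ≤ p.1 ∧ p.1 < pvR G ∧ 0 ≤ p.2 ∧ p.2 < pvW G p.1 ∧ pvSeat G p.1 p.2 := by 
  obtain ⟨a, b⟩ := p
  simp only [pvSP, pvSeatPos, pvW, List.mem_flatMap, List.mem_map, List.mem_filter,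
    PySem.List.mem_pyRange_one, Prod.mk.injEq, decide_eq_true_eq, PySem.List.len_eq]
  constructor
  · rintro ⟨r, ⟨hr1, hr2⟩, c, ⟨⟨hc1, hc2⟩, hseat⟩, rfl, rfl⟩
    exact ⟨hr1, hr2, hc1, hc2, hseat⟩
  · rintro ⟨h1, h2, h3, h4, h5⟩
    exact ⟨a, ⟨h1, h2⟩, b, ⟨⟨h3, h4⟩, h5⟩, rfl, rfl⟩
  

-- ---------- pySetD / pyGetD helpers ----------

theorem pySetD_append_cons {α : Type} (pre : List α) (x : α) (suf : List α) (v : α) :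
    PySem.List.pySetD (pre ++ x :: suf) (pre.length : Int) v = pre ++ v :: suf := by 
  have hlt : pre.length < (pre ++ x :: suf).length := by simp
  simp only [PySem.List.pySetD, PySem.List.pySet?_natCast _ _ _ hlt, Option.getD_some]
  rw [List.set_append_right _ _ (Nat.le_refl _)]
  simp
  

theorem pyGetD_append_cons {α : Type} (pre : List α) (x : α) (suf : List α) (d : α) :
    PySem.List.pyGetD (pre ++ x :: suf) (pre.length : Int) d = x := by 
  rw [PySem.List.pyGetD_natCast]
  have hlt : pre.length < (pre ++ x :: suf).length := by simp
  rw [List.getD_eq_getElem _ _ hlt]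
  rw [List.getElem_append_right (Nat.le_refl _)]
  simp
  

-- ---------- the visible_seats dict loop as independent rays ----------

theorem dirDelta_pair (d : String) (dr dc : Int)
    (hd : (d, (dr, dc)) ∈ pvDirList.zip pvDirPairs) (row col delta : Int) :
    pvDirDelta d row col delta = (row + dr * delta, col + dc * delta) := by 
  simp only [pvDirList, pvDirPairs, List.zip_cons_cons, List.zip_nil_right,
    List.mem_cons, List.not_mem_nil, or_false, Prod.mk.injEq] at hd
  rcases hd with ⟨rfl, rfl, rfl⟩ | ⟨rfl, rfl, rfl⟩ | ⟨rfl, rfl, rfl⟩ | ⟨rfl, rfl, rfl⟩ |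
    ⟨rfl, rfl, rfl⟩ | ⟨rfl, rfl, rfl⟩ | ⟨rfl, rfl, rfl⟩ | ⟨rfl, rfl, rfl⟩ <;>
    simp only [pvDirDelta] <;> norm_num <;> constructor <;> ring
  

theorem erase_foldl (t : List String) : ∀ (s : List String), s.Nodup →
    t.foldl (fun acc d => acc.erase d) s = s.filter (fun d => decide (d ∉ t)) := by
  induction t with
  | nil =>
    intro s hs
    simp only [List.foldl_nil]
    rw [List.filter_eq_self.mpr]
    intro a _
    simp
  | cons x t ih =>
    intro s hs
    simp only [List.foldl_cons]
    rw [ih (s.erase x) (hs.erase x)]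
    rw [List.Nodup.erase_eq_filter hs]
    rw [List.filter_filter]
    apply List.filter_congr
    intro a _
    simp only [List.mem_cons, not_or]
    rcases Decidable.em (a = x) with h1 | h1 <;> rcases Decidable.em (a ∈ t) with h2 | h2 <;>
      simp [h1, h2]

def rayKeep (g : List (List String)) (row col delta : Int) (d : String) : Bool :=
  pvIsValid g (pvDirDelta d row col delta).1 (pvDirDelta d row col delta).2 &&
  !(decide (pvCell g (pvDirDelta d row col delta).1 (pvDirDelta d row col delta).2 = "L")) &&
  !(decide (pvCell g (pvDirDelta d row col delta).1 (pvDirDelta d row col delta).2 = "#"))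

def rayHitHere (g : List (List String)) (row col delta : Int) (d : String) : Bool :=
  pvIsValid g (pvDirDelta d row col delta).1 (pvDirDelta d row col delta).2 &&
  !(decide (pvCell g (pvDirDelta d row col delta).1 (pvDirDelta d row col delta).2 = "L")) &&
  decide (pvCell g (pvDirDelta d row col delta).1 (pvDirDelta d row col delta).2 = "#")

theorem visStep_prod (g : List (List String)) (row col delta : Int) :
    pvVisStep g row col delta = fun st d =>
      ((if rayKeep g row col delta d then st.1 else st.1.erase d),
       (if rayHitHere g row col delta d then st.2 ++ [pvDirDelta d row col delta] else st.2)) := by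
  funext st d
  simp only [pvVisStep, rayKeep, rayHitHere]
  by_cases hv : pvIsValid g (pvDirDelta d row col delta).1 (pvDirDelta d row col delta).2 = true <;>
    by_cases hL : pvCell g (pvDirDelta d row col delta).1 (pvDirDelta d row col delta).2 = "L" <;>
      by_cases hH : pvCell g (pvDirDelta d row col delta).1 (pvDirDelta d row col delta).2 = "#" <;>
        simp [hv, hL, hH]

theorem sum_map_add_nat {α : Type} (l : List α) (f g : α → Nat) :
    (l.map (fun x => f x + g x)).sum = (l.map f).sum + (l.map g).sum := by
  induction l with
  | nil => rfl
  | cons x t ih => simp [ih]; omega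

theorem sum_map_ite_len {α : Type} (l : List α) (P : α → Bool) :
    (l.map (fun d => if P d then 1 else 0)).sum = (l.filter P).length := by
  induction l with
  | nil => rfl
  | cons x t ih =>
    cases h : P x <;> simp [h, ih] <;> omega

theorem sum_map_ite_zero {α : Type} (l : List α) (P : α → Bool) (f : α → Nat) :
    (l.map (fun d => if P d then f d else 0)).sum
      = ((l.filter P).map f).sum := by
  induction l with
  | nil => rfl
  | cons x t ih =>
    cases h : P x <;> simp [h, ih]

theorem visLoop_len (g : List (List String)) (row col : Int) :
    ∀ (fuel : Nat) (dirs : List String) (delta : Int) (vis : List (Int × Int)),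
    dirs.Nodup →
    (pvVisLoop g row col fuel dirs delta vis).length
      = vis.length + (dirs.map (fun d => (rayA g row col d fuel delta).elim 0 (fun _ => 1))).sum := by
  
  intro fuel
  induction fuel with
  | zero =>
    intro dirs delta vis _
    simp [pvVisLoop, rayA]
  | succ fuel ih =>
    intro dirs delta vis hnd
    by_cases hnil : dirs = []
    · subst hnil; simp [pvVisLoop]
    · rw [pvVisLoop]
      rw [if_neg hnil]
      rw [visStep_prod g row col delta]
      simp only []
      rw [PySem.List.foldl_prod_mk
        (f := fun (acc : List String) d => if rayKeep g row col delta d then acc else acc.erase d)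
        (g := fun (acc : List (Int × Int)) d => if rayHitHere g row col delta d then acc ++ [pvDirDelta d row col delta] else acc)]
      -- dirs component
      have hD : dirs.foldl (fun acc d => if rayKeep g row col delta d then acc else acc.erase d) dirs
          = dirs.filter (rayKeep g row col delta) := by
        have h1 : (fun (acc : List String) d => if rayKeep g row col delta d then acc else acc.erase d)
            = fun acc d => if (!rayKeep g row col delta d) = true then acc.erase d else acc := by
          funext acc d; cases h : rayKeep g row col delta d <;> simp [h]
        rw [h1, PySem.List.foldl_if_eq_foldl_filter]
        have h2 : dirs.filter (fun d => !rayKeep g row col delta d)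
            = dirs.filter (fun d => decide (¬ rayKeep g row col delta d = true)) := by
          apply List.filter_congr; intro d _; cases h : rayKeep g row col delta d <;> simp [h]
        rw [h2]
        rw [erase_foldl _ dirs hnd]
        apply List.filter_congr
        intro d hd
        cases h : rayKeep g row col delta d <;> simp [h, hd]
      -- vis component
      have hV : dirs.foldl (fun acc d => if rayHitHere g row col delta d then acc ++ [pvDirDelta d row col delta] else acc) vis
          = vis ++ (dirs.filter (rayHitHere g row col delta)).map
              (fun d => pvDirDelta d row col delta) := by
        rw [PySem.List.foldl_append_if]
      rw [hD, hV]
      rw [ih _ (delta + 1) _ (List.Nodup.filter _ hnd)]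
      simp only [List.length_append, List.length_map]
      -- arithmetic: split the right-hand sum pointwise
      have hsplit : (dirs.map (fun d => (rayA g row col d (fuel + 1) delta).elim 0 (fun _ => 1))).sum
          = (dirs.filter (rayHitHere g row col delta)).length
            + ((dirs.filter (rayKeep g row col delta)).map
                (fun d => (rayA g row col d fuel (delta + 1)).elim 0 (fun _ => 1))).sum := by
        have hpt : ∀ d, (rayA g row col d (fuel + 1) delta).elim 0 (fun _ => 1)
            = (if rayHitHere g row col delta d then 1 else 0)
              + (if rayKeep g row col delta d then (rayA g row col d fuel (delta + 1)).elim 0 (fun _ => 1) else 0) := by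
          intro d
          rw [rayA]
          simp only [rayKeep, rayHitHere]
          by_cases hv : pvIsValid g (pvDirDelta d row col delta).1 (pvDirDelta d row col delta).2 = true <;>
            by_cases hL : pvCell g (pvDirDelta d row col delta).1 (pvDirDelta d row col delta).2 = "L" <;>
              by_cases hH : pvCell g (pvDirDelta d row col delta).1 (pvDirDelta d row col delta).2 = "#" <;>
                simp [hv, hL, hH]
        calc (dirs.map (fun d => (rayA g row col d (fuel + 1) delta).elim 0 (fun _ => 1))).sum
            = (dirs.map (fun d => (if rayHitHere g row col delta d then 1 else 0)
              + (if rayKeep g row col delta d then (rayA g row col d fuel (delta + 1)).elim 0 (fun _ => 1) else 0))).sum := by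
              rw [List.map_congr_left (fun d _ => hpt d)]
          _ = _ := by
              rw [sum_map_add_nat, sum_map_ite_len, sum_map_ite_zero]
      rw [hsplit]
      omega
  

theorem vis_len (g : List (List String)) (row col : Int) :
    (visible_seatsA g row col).length
      = (pvDirList.map (fun d =>
          (rayA g row col d (g.length + (PySem.List.pyGetD g 0 []).length + 2) 1).elim 0
            (fun _ => 1))).sum := by 
  rw [visible_seatsA, visLoop_len g row col _ _ _ _ (by decide)]
  simp
  

-- ---------- ray correspondence A ↔ B ----------

theorem ray_ab {G g : List (List String)} (hPre : Pre_part_2 G) (hSk : pvSk G g)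
    (row col : Int) (d : String) (dr dc : Int)
    (hd : (d, (dr, dc)) ∈ pvDirList.zip pvDirPairs) :
    ∀ (fuel : Nat) (delta : Int),
    rayA g row col d fuel delta
      = (pvRayB (PySem.Set.ofList (pvSP G)) (pvR G) (pvC G) dr dc fuel
          (row + dr * delta) (col + dc * delta)).bind
          (fun q => if pvCell g q.1 q.2 = "#" then some q else none) := by 
  intro fuel
  induction fuel with
  | zero => intro delta; simp [rayA, pvRayB]
  | succ fuel ih =>
    intro delta
    rw [rayA, pvRayB]
    simp only [dirDelta_pair d dr dc hd row col delta]
    rw [isValid_eq hSk]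
    by_cases hv : 0 ≤ row + dr * delta ∧ row + dr * delta < pvR G ∧ 0 ≤ col + dc * delta ∧ col + dc * delta < pvC G
    case neg =>
      simp [hv]
    case pos =>
      simp only [hv, decide_true, if_true, not_true_eq_false, if_neg, ite_not]
      have hw : col + dc * delta < pvW G (row + dr * delta) :=
        lt_of_lt_of_le hv.2.2.2 (width_ge hPre hv.1 hv.2.1)
      have hiff : (row + dr * delta, col + dc * delta) ∈ PySem.Set.ofList (pvSP G)
          ↔ pvSeat G (row + dr * delta) (col + dc * delta) := by
        rw [PySem.Set.mem_ofList, mem_SP]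
        exact ⟨fun h => h.2.2.2.2, fun h => ⟨hv.1, hv.2.1, hv.2.2.1, hw, h⟩⟩
      have hmem : PySem.Set.contains (PySem.Set.ofList (pvSP G)) (row + dr * delta, col + dc * delta)
          = decide (pvSeat G (row + dr * delta) (col + dc * delta)) := by
        apply Bool.eq_iff_iff.mpr
        simp only [PySem.Set.contains, List.contains_iff_mem, decide_eq_true_eq]
        exact hiff
      rw [hmem]
      have hcellfacts := (hSk.2 (row + dr * delta) (col + dc * delta) hv.1 hv.2.1 hv.2.2.1 hw)
      by_cases hs : pvSeat G (row + dr * delta) (col + dc * delta)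
      · -- first seat reached: B stops here; A answers according to the current cell
        simp only [hs, decide_true, if_true]
        rcases hcellfacts.2 hs with hL | hH
        · simp [hL]
        · simp [hH]
      · -- not a seat: both sides continue one step further
        have hcg : pvCell g (row + dr * delta) (col + dc * delta) = pvCell G (row + dr * delta) (col + dc * delta) :=
          hcellfacts.1 hs
        have hnL : ¬ pvCell g (row + dr * delta) (col + dc * delta) = "L" := by
          rw [hcg]; intro hx; exact hs (Or.inl hx)
        have hnH : ¬ pvCell g (row + dr * delta) (col + dc * delta) = "#" := by
          rw [hcg]; intro hx; exact hs (Or.inr hx)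
        simp only [hs, decide_false, if_false, hnL, hnH, ite_false]
        have := ih (delta + 1)
        have harith1 : row + dr * delta + dr = row + dr * (delta + 1) := by ring
        have harith2 : col + dc * delta + dc = col + dc * (delta + 1) := by ring
        rw [harith1, harith2]
        simpa using this
  

theorem countP_filterMap {α β : Type} (f : α → Option β) (P : β → Bool) (l : List α) :
    ((l.filterMap f).countP P : Int)
      = (l.map (fun e => ((f e).bind (fun q => if P q then some q else none)).elim 0
          (fun _ => (1 : Int)))).sum := by 
  induction l with
  | nil => rfl
  | cons x t ih =>
    cases hf : f x with
    | none => simp [List.filterMap_cons, hf, ih]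
    | some q =>
      cases hq : P q with
      | false => simp [List.filterMap_cons, hf, List.countP_cons, hq, ih]
      | true => simp [List.filterMap_cons, hf, List.countP_cons, hq, ih]; omega
  

theorem pvNbr_eq_filterMap (s : List (Int × Int)) (R C : Int) (p : Int × Int) :
    pvNbr s R C p = pvDirPairs.filterMap (fun d =>
      pvRayB s R C d.1 d.2 ((R + C).toNat + 2) (p.1 + d.1) (p.2 + d.2)) := by 
  rw [pvNbr]
  have h1 : (fun (lst : List (Int × Int)) (d : Int × Int) =>
      match pvRayB s R C d.1 d.2 ((R + C).toNat + 2) (p.1 + d.1) (p.2 + d.2) with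
      | some q => lst ++ [q]
      | none => lst)
      = fun lst d => lst ++ (pvRayB s R C d.1 d.2 ((R + C).toNat + 2) (p.1 + d.1) (p.2 + d.2)).toList := by
    funext lst d
    cases pvRayB s R C d.1 d.2 ((R + C).toNat + 2) (p.1 + d.1) (p.2 + d.2) <;> simp
  rw [h1, PySem.List.foldl_append_eq_flatMap]
  have h2 : ∀ (l : List (Int × Int)),
      l.flatMap (fun d => (pvRayB s R C d.1 d.2 ((R + C).toNat + 2) (p.1 + d.1) (p.2 + d.2)).toList)
        = l.filterMap (fun d => pvRayB s R C d.1 d.2 ((R + C).toNat + 2) (p.1 + d.1) (p.2 + d.2)) := by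
    intro l
    induction l with
    | nil => rfl
    | cons x t ih =>
      rw [List.flatMap_cons, List.filterMap_cons]
      cases pvRayB s R C x.1 x.2 ((R + C).toNat + 2) (p.1 + x.1) (p.2 + x.2) <;> simp [ih]
  rw [List.nil_append, h2]
  

theorem vc_eq {G g : List (List String)} (hPre : Pre_part_2 G) (hSk : pvSk G g)
    (p : Int × Int) (hp : p ∈ pvSP G) :
    pvVC g p.1 p.2
      = ((pvNbr (PySem.Set.ofList (pvSP G)) (pvR G) (pvC G) p).countP
          (fun q => decide (pvCell g q.1 q.2 = "#")) : Int) := by 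
  have hlen : g.length = G.length := sk_len hSk
  have hhead : (PySem.List.pyGetD g 0 []).length = (G.headD []).length := by
    have := sk_head_len hSk; simp only [pvC] at this; omega
  have hF : g.length + (PySem.List.pyGetD g 0 []).length + 2 = (pvR G + pvC G).toNat + 2 := by
    simp only [pvR, pvC, hlen, hhead]; omega
  have hcast : ∀ (o : Option (Int × Int)),
      ((o.elim 0 (fun _ => 1) : Nat) : Int) = o.elim 0 (fun _ => (1 : Int)) := by
    intro o; cases o <;> simp
  have hbind : (fun (q : Int × Int) => if decide (pvCell g q.1 q.2 = "#") = true then some q else none)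
      = fun q => if pvCell g q.1 q.2 = "#" then some q else none := by
    funext q; by_cases h : pvCell g q.1 q.2 = "#" <;> simp [h]
  have hray : ∀ (d : String) (dr dc : Int), (d, (dr, dc)) ∈ pvDirList.zip pvDirPairs →
      rayA g p.1 p.2 d ((pvR G + pvC G).toNat + 2) 1
        = (pvRayB (PySem.Set.ofList (pvSP G)) (pvR G) (pvC G) dr dc ((pvR G + pvC G).toNat + 2)
            (p.1 + dr) (p.2 + dc)).bind (fun q => if pvCell g q.1 q.2 = "#" then some q else none) := by
    intro d dr dc hdm
    have := ray_ab hPre hSk p.1 p.2 d dr dc hdm ((pvR G + pvC G).toNat + 2) 1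
    simpa using this
  unfold pvVC
  rw [vis_len, hF]
  rw [pvNbr_eq_filterMap, countP_filterMap, hbind]
  rw [Nat.cast_list_sum, List.map_map]
  simp only [pvDirList, pvDirPairs, List.map_cons, List.map_nil, List.sum_cons, List.sum_nil,
    Function.comp]
  rw [hray "NW" (-1) (-1) (by decide), hray "N" (-1) 0 (by decide), hray "NE" (-1) 1 (by decide),
      hray "W" 0 (-1) (by decide), hray "E" 0 1 (by decide), hray "SW" 1 (-1) (by decide),
      hray "S" 1 0 (by decide), hray "SE" 1 1 (by decide)]
  simp only [hcast]
  

-- ---------- the pass as a pointwise step ----------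

theorem rowp (g : List (List String)) (r : Int) :
    ∀ (tail done : List String) (j t : Int) (b : Bool), j = (done.length : Int) →
    (PySem.List.enumerate tail j).foldl (pvRowFn g r) (done ++ tail, t, b)
      = (done ++ (PySem.List.enumerate tail j).map (fun q => nCell g r q.1 q.2),
         t + ((PySem.List.enumerate tail j).map (fun q => dOcc g r q.1 q.2)).sum,
         b || (PySem.List.enumerate tail j).any (fun q => decide (nCell g r q.1 q.2 ≠ q.2))) := by
  intro tail
  induction tail with
  | nil =>
    intro done j t b hj
    simp [PySem.List.enumerate]
  | cons x xs ih =>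
    intro done j t b hj
    rw [PySem.List.enumerate_cons]
    simp only [List.foldl_cons, List.map_cons, List.any_cons, List.sum_cons]
    by_cases h1 : x = "L" ∧ pvVC g r j = 0
    · obtain ⟨hx, hv0⟩ := h1
      subst hx
      have hstep : pvRowFn g r (done ++ "L" :: xs, t, b) (j, "L")
          = (done ++ "#" :: xs, t + 1, true) := by
        simp only [pvRowFn]
        simp [hv0]
        rw [hj, pySetD_append_cons]
      rw [hstep]
      have hnc : nCell g r j "L" = "#" := by simp [nCell, hv0]
      have hdo : dOcc g r j "L" = 1 := by simp [dOcc, hv0]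
      have hcons : done ++ "#" :: xs = (done ++ ["#"]) ++ xs := by simp
      rw [hcons, ih (done ++ ["#"]) (j + 1) (t + 1) true (by simp [hj])]
      simp only [Prod.mk.injEq]
      refine ⟨by simp [hnc], by simp [hdo]; ring, by simp [hnc]⟩
    · by_cases h2 : x = "#" ∧ pvVC g r j ≥ 5
      · obtain ⟨hx, hv5⟩ := h2
        subst hx
        have hne : ¬ (("#" : String) = "L" ∧ pvVC g r j = 0) := by
          intro h; exact absurd h.1 (by decide)
        have hstep : pvRowFn g r (done ++ "#" :: xs, t, b) (j, "#")
            = (done ++ "L" :: xs, t - 1, true) := by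
          simp only [pvRowFn]
          simp [hne, hv5]
          rw [hj, pySetD_append_cons]
        rw [hstep]
        have hnc : nCell g r j "#" = "L" := by
          simp only [nCell]
          simp [hv5]
        have hdo : dOcc g r j "#" = -1 := by
          simp only [dOcc]
          simp [hv5]
        have hcons : done ++ "L" :: xs = (done ++ ["L"]) ++ xs := by simp
        rw [hcons, ih (done ++ ["L"]) (j + 1) (t - 1) true (by simp [hj])]
        simp only [Prod.mk.injEq]
        refine ⟨by simp [hnc], by simp [hdo]; ring, by simp [hnc]⟩
      · have hstep : pvRowFn g r (done ++ x :: xs, t, b) (j, x) = (done ++ x :: xs, t, b) := by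
          simp only [pvRowFn]
          simp [h1, h2]
        rw [hstep]
        have hnc : nCell g r j x = x := by
          simp only [nCell]
          rw [if_neg h1, if_neg h2]
        have hdo : dOcc g r j x = 0 := by
          simp only [dOcc]
          rw [if_neg h1, if_neg h2]
        have hcons : done ++ x :: xs = (done ++ [x]) ++ xs := by simp
        rw [hcons, ih (done ++ [x]) (j + 1) t b (by simp [hj])]
        simp only [Prod.mk.injEq]
        refine ⟨by simp [hnc], by simp [hdo], by simp [hnc]⟩

theorem hoist (g : List (List String)) (r : Int) (hr : 0 ≤ r) :
    ∀ (l : List (Int × String)) (tmp : List (List String)) (t : Int) (b : Bool),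
    r.toNat < tmp.length →
    l.foldl (pvInner g r) (tmp, t, b)
      = (PySem.List.pySetD tmp r (l.foldl (pvRowFn g r) (PySem.List.pyGetD tmp r [], t, b)).1,
         (l.foldl (pvRowFn g r) (PySem.List.pyGetD tmp r [], t, b)).2) := by 
  intro l
  induction l with
  | nil =>
    intro tmp t b hlt
    simp only [List.foldl_nil]
    rw [setD_int tmp hr hlt, getD_int tmp hr, List.getD_eq_getElem _ _ hlt, List.set_getElem_self]
  | cons q l ih =>
    intro tmp t b hlt
    simp only [List.foldl_cons]
    rw [getD_int tmp hr, List.getD_eq_getElem _ _ hlt]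
    by_cases h1 : q.2 = "L" ∧ pvVC g r q.1 = 0
    · have hA : pvInner g r (tmp, t, b) q
          = (PySem.List.pySetD tmp r (PySem.List.pySetD tmp[r.toNat] q.1 "#"), t + 1, true) := by
        simp only [pvInner, pvSetCell]
        rw [getD_int tmp hr, List.getD_eq_getElem _ _ hlt]
        simp [h1]
      have hB : pvRowFn g r (tmp[r.toNat], t, b) q
          = (PySem.List.pySetD tmp[r.toNat] q.1 "#", t + 1, true) := by
        simp only [pvRowFn]
        simp [h1]
      rw [hA, hB, ih _ _ _ (by simpa using hlt)]
      rw [setD_int tmp hr hlt]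
      rw [getD_int _ hr, List.getD_eq_getElem _ _ (by simpa using hlt), List.getElem_set_self]
      rw [setD_int _ hr (by simpa using hlt)]
      rw [List.set_set, setD_int tmp hr hlt]
    · by_cases h2 : q.2 = "#" ∧ pvVC g r q.1 ≥ 5
      · have hA : pvInner g r (tmp, t, b) q
            = (PySem.List.pySetD tmp r (PySem.List.pySetD tmp[r.toNat] q.1 "L"), t - 1, true) := by
          simp only [pvInner, pvSetCell]
          rw [getD_int tmp hr, List.getD_eq_getElem _ _ hlt]
          simp [h1, h2]
        have hB : pvRowFn g r (tmp[r.toNat], t, b) q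
            = (PySem.List.pySetD tmp[r.toNat] q.1 "L", t - 1, true) := by
          simp only [pvRowFn]
          simp [h1, h2]
        rw [hA, hB, ih _ _ _ (by simpa using hlt)]
        rw [setD_int tmp hr hlt]
        rw [getD_int _ hr, List.getD_eq_getElem _ _ (by simpa using hlt), List.getElem_set_self]
        rw [setD_int _ hr (by simpa using hlt)]
        rw [List.set_set, setD_int tmp hr hlt]
      · have hA : pvInner g r (tmp, t, b) q = (tmp, t, b) := by
          simp only [pvInner, h1, h2, if_false]
        have hB : pvRowFn g r (tmp[r.toNat], t, b) q = (tmp[r.toNat], t, b) := by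
          simp only [pvRowFn]
          simp [h1, h2]
        rw [hA, hB, ih _ _ _ hlt]
        rw [getD_int tmp hr, List.getD_eq_getElem _ _ hlt]
  

theorem passp (g : List (List String)) :
    ∀ (tailg doneg : List (List String)) (i t : Int) (b : Bool), i = (doneg.length : Int) →
    (PySem.List.enumerate tailg i).foldl
        (fun st p => (PySem.List.enumerate p.2).foldl (pvInner g p.1) st) (doneg ++ tailg, t, b)
      = (doneg ++ (PySem.List.enumerate tailg i).map (fun p => nRow g p.1 p.2),
         t + ((PySem.List.enumerate tailg i).map (fun p => rowDelta g p.1 p.2)).sum,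
         b || (PySem.List.enumerate tailg i).any (fun p => rowCh g p.1 p.2)) := by 
  intro tailg
  induction tailg with
  | nil =>
    intro doneg i t b hi
    simp [PySem.List.enumerate]
  | cons row rows ih =>
    intro doneg i t b hi
    subst hi
    rw [PySem.List.enumerate_cons]
    simp only [List.foldl_cons, List.map_cons, List.any_cons, List.sum_cons]
    have hi0 : (0:Int) ≤ (doneg.length : Int) := Int.natCast_nonneg _
    have hlt : ((doneg.length : Int)).toNat < (doneg ++ row :: rows).length := by simp
    have hget : PySem.List.pyGetD (doneg ++ row :: rows) ((doneg.length : Int)) [] = row :=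
      pyGetD_append_cons doneg row rows []
    have hfold : (PySem.List.enumerate row).foldl (pvInner g ((doneg.length : Int)))
          (doneg ++ row :: rows, t, b)
        = (PySem.List.pySetD (doneg ++ row :: rows) ((doneg.length : Int))
            (nRow g ((doneg.length : Int)) row),
           t + rowDelta g ((doneg.length : Int)) row, b || rowCh g ((doneg.length : Int)) row) := by
      rw [hoist g ((doneg.length : Int)) hi0 _ _ _ _ hlt]
      rw [hget]
      have h0 := rowp g ((doneg.length : Int)) row [] 0 t b (by simp)
      simp only [List.nil_append] at h0
      rw [h0]
      rfl
    rw [hfold, pySetD_append_cons]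
    have hcons : doneg ++ nRow g ((doneg.length : Int)) row :: rows
        = (doneg ++ [nRow g ((doneg.length : Int)) row]) ++ rows := by simp
    rw [hcons, ih (doneg ++ [nRow g ((doneg.length : Int)) row]) ((doneg.length : Int) + 1)
      (t + rowDelta g ((doneg.length : Int)) row) (b || rowCh g ((doneg.length : Int)) row) (by simp)]
    simp only [Prod.mk.injEq]
    refine ⟨by simp, by ring_nf, by simp [Bool.or_assoc]⟩


theorem passA_step (g : List (List String)) (t : Int) (b : Bool) :
    pvPassA g (g, t, b) = (gStep g, t + gDelta g, b || gCh g) := by 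
  rw [passA_eq_inner]
  have := passp g g [] 0 t b (by simp)
  simp only [List.nil_append] at this
  rw [this]
  rfl
  

-- ---------- gStep pointwise facts ----------

theorem length_gStep (g : List (List String)) : (gStep g).length = g.length := by 
  rw [gStep, List.length_map, PySem.List.length_enumerate]
  

theorem getElem_gStep (g : List (List String)) (r : Nat) (hr : r < g.length)
    (hr' : r < (gStep g).length) : (gStep g)[r] = nRow g (r : Int) g[r] := by 
  unfold gStep
  rw [List.getElem_map]
  rw [PySem.List.getElem_enumerate]
  simp
  

theorem length_nRow (g : List (List String)) (r : Int) (row : List String) :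
    (nRow g r row).length = row.length := by 
  rw [nRow, List.length_map, PySem.List.length_enumerate]
  

theorem getElem_nRow (g : List (List String)) (r : Int) (row : List String) (c : Nat)
    (hc : c < row.length) (hc' : c < (nRow g r row).length) :
    (nRow g r row)[c] = nCell g r (c : Int) row[c] := by 
  unfold nRow
  rw [List.getElem_map]
  rw [PySem.List.getElem_enumerate]
  simp
  

theorem cell_int (g : List (List String)) {r c : Int} (hr : 0 ≤ r) (hc : 0 ≤ c) :
    pvCell g r c = (g.getD r.toNat []).getD c.toNat "" := by 
  simp [pvCell, PySem.List.pyGetD_of_nonneg _ _ hr, PySem.List.pyGetD_of_nonneg _ _ hc]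
  

theorem cell_gStep (g : List (List String)) {r c : Int} (hr : 0 ≤ r)
    (hrR : r < (g.length : Int)) (hc : 0 ≤ c)
    (hcC : c < ((g.getD r.toNat []).length : Int)) :
    pvCell (gStep g) r c = nCell g r c (pvCell g r c) := by 
  have hrn : r.toNat < g.length := by omega
  have hcn : c.toNat < (g.getD r.toNat []).length := by omega
  have hrn' : r.toNat < (gStep g).length := by rw [length_gStep]; omega
  rw [cell_int _ hr hc, cell_int _ hr hc]
  rw [List.getD_eq_getElem _ _ hrn', List.getD_eq_getElem _ _ hrn]
  rw [getElem_gStep g r.toNat hrn hrn']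
  have hget : g.getD r.toNat [] = g[r.toNat] := List.getD_eq_getElem _ _ hrn
  rw [hget] at hcn
  have hcn' : c.toNat < (nRow g (r.toNat : Int) g[r.toNat]).length := by
    rw [length_nRow]; omega
  rw [List.getD_eq_getElem _ _ hcn', List.getD_eq_getElem _ _ hcn]
  rw [getElem_nRow g _ _ _ hcn hcn']
  congr 1 <;> omega
  

theorem sk_step {G g : List (List String)} (hPre : Pre_part_2 G) (hSk : pvSk G g) :
    pvSk G (gStep g) := by 
  have hlen : g.length = G.length := sk_len hSk
  constructor
  · -- shapes
    have h1 : (gStep g).map List.length = g.map List.length := by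
      apply List.ext_getElem (by simp [length_gStep])
      intro i h1 h2
      rw [List.getElem_map, List.getElem_map,
        getElem_gStep g i (by simpa [length_gStep] using h1 ) (by simpa using h1), length_nRow]
    rw [h1]; exact hSk.1
  · intro r c hr0 hrR hc0 hcC
    have hrn : r.toNat < g.length := by simp only [pvR] at hrR; omega
    have hcn : c.toNat < (g.getD r.toNat []).length := by
      rw [sk_row_len hSk r.toNat hrn]
      simp only [pvW, getD_int G hr0] at hcC
      omega
    have hcell := cell_gStep g hr0 (by omega) hc0 (by omega)
    have hfacts := hSk.2 r c hr0 hrR hc0 hcC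
    constructor
    · intro hns
      rw [hcell]
      have hx := hfacts.1 hns
      have hxL : ¬ (pvCell g r c = "L" ∧ pvVC g r c = 0) := by
        intro hcon
        exact hns (Or.inl (by rw [← hx, hcon.1]))
      have hxH : ¬ (pvCell g r c = "#" ∧ pvVC g r c ≥ 5) := by
        intro hcon
        exact hns (Or.inr (by rw [← hx, hcon.1]))
      rw [nCell, if_neg hxL, if_neg hxH, hx]
    · intro hs
      rw [hcell, nCell]
      rcases hfacts.2 hs with hL | hH
      · by_cases hv : pvVC g r c = 0
        · right; simp [hL, hv]
        · left; simp [hL, hv]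
      · have hne : ¬ (pvCell g r c = "L" ∧ pvVC g r c = 0) := by
          intro hcon; rw [hcon.1] at hH; exact absurd hH (by decide)
        by_cases hv : pvVC g r c ≥ 5
        · left; simp [hne, hH, hv]
        · right; simp [hne, hH, hv]

  

theorem nRow_eq_iff (g : List (List String)) (r : Int) (row : List String) :
    nRow g r row = row ↔ ∀ (k : Nat) (h : k < row.length), nCell g r (k : Int) row[k] = row[k] := by
  constructor
  · intro h k hk
    have hk' : k < (nRow g r row).length := by rw [length_nRow]; omega
    have := List.getElem_of_eq h hk'
    rw [getElem_nRow g r row k hk hk'] at this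
    exact this
  · intro h
    apply List.ext_getElem (length_nRow g r row)
    intro i h1 h2
    rw [getElem_nRow g r row i h2 h1]
    exact h i h2

theorem gStep_eq_iff (g : List (List String)) :
    gStep g = g ↔ ∀ (k : Nat) (h : k < g.length), nRow g (k : Int) g[k] = g[k] := by
  constructor
  · intro h k hk
    have hk' : k < (gStep g).length := by rw [length_gStep]; omega
    have := List.getElem_of_eq h hk'
    rw [getElem_gStep g k hk hk'] at this
    exact this
  · intro h
    apply List.ext_getElem (length_gStep g)
    intro i h1 h2
    rw [getElem_gStep g i h2 h1]
    exact h i h2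

theorem gCh_false_iff (g : List (List String)) : gCh g = false ↔ gStep g = g := by 
  rw [gStep_eq_iff]
  rw [gCh, List.any_eq_false]
  constructor
  · intro h k hk
    have hmem : ((k : Int), g[k]) ∈ PySem.List.enumerate g := by
      rw [PySem.List.mem_enumerate_iff]
      exact ⟨k, hk, by simp⟩
    have hrow := h _ hmem
    simp only [rowCh, Bool.not_eq_true, List.any_eq_false] at hrow
    rw [nRow_eq_iff]
    intro j hj
    have hmem2 : ((j : Int), g[k][j]) ∈ PySem.List.enumerate g[k] := by
      rw [PySem.List.mem_enumerate_iff]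
      exact ⟨j, hj, by simp⟩
    have := hrow _ hmem2
    simpa using this
  · intro h p hp
    rw [PySem.List.mem_enumerate_iff] at hp
    obtain ⟨k, hk, rfl⟩ := hp
    simp only [rowCh, Bool.not_eq_true, List.any_eq_false]
    intro q hq
    rw [PySem.List.mem_enumerate_iff] at hq
    obtain ⟨j, hj, rfl⟩ := hq
    have := (nRow_eq_iff g ((0:Int) + (k:Int)) g[k]).mp (by simpa using h k hk) j hj
    simpa using this
  

-- ---------- occupancy counting ----------

theorem dOcc_split (g : List (List String)) (r c : Int) (x : String) :
    dOcc g r c x = indOcc (nCell g r c x) - indOcc x := by 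
  by_cases h1 : x = "L" ∧ pvVC g r c = 0
  · rw [dOcc, if_pos h1, nCell, if_pos h1]
    rw [h1.1]
    simp [indOcc]
  · by_cases h2 : x = "#" ∧ pvVC g r c ≥ 5
    · rw [dOcc, if_neg h1, if_pos h2, nCell, if_neg h1, if_pos h2]
      rw [h2.1]
      simp [indOcc]
    · rw [dOcc, if_neg h1, if_neg h2, nCell, if_neg h1, if_neg h2]
      ring
  

theorem countP_flatMap {α β : Type} (f : α → List β) (P : β → Bool) (l : List α) :
    (l.flatMap f).countP P = (l.map (fun a => (f a).countP P)).sum := by 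
  induction l with
  | nil => rfl
  | cons x t ih => simp [List.countP_append, ih]
  

theorem cast_sum_nat {α : Type} (l : List α) (f : α → Nat) :
    (((l.map f).sum : Nat) : Int) = (l.map (fun x => ((f x : Nat) : Int))).sum := by
  induction l with
  | nil => rfl
  | cons x t ih => simp [ih]

theorem enum_map_sum {α : Type} (xs : List α) (d : α) (f : Int → α → Int) :
    ((PySem.List.enumerate xs).map (fun p => f p.1 p.2)).sum
      = ((PySem.List.pyRange 0 (PySem.List.len xs)).map
          (fun j => f j (PySem.List.pyGetD xs j d))).sum := by
  rw [PySem.List.enumerate_eq_map_pyRange xs d, List.map_map]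
  rfl

theorem sum_map_sub_int {α : Type} (l : List α) (f g : α → Int) :
    (l.map (fun x => f x - g x)).sum = (l.map f).sum - (l.map g).sum := by
  induction l with
  | nil => simp
  | cons x t ih => simp [ih]; ring

theorem sk_width {G g : List (List String)} (hSk : pvSk G g) {r : Int}
    (h0 : 0 ≤ r) (hR : r < pvR G) :
    PySem.List.len (PySem.List.pyGetD g r []) = pvW G r := by
  have hrn : r.toNat < g.length := by have := sk_len hSk; simp only [pvR] at hR; omega
  rw [PySem.List.len_eq, getD_int g h0, sk_row_len hSk r.toNat hrn]
  simp only [pvW, getD_int G h0]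

theorem cnt_eq {G h : List (List String)} (hSk : pvSk G h) :
    ((PySem.List.pyRange 0 (pvR G)).map (fun r =>
        ((PySem.List.pyRange 0 (pvW G r)).map (fun c => indOcc (pvCell h r c))).sum)).sum
      = ((pvOcc G h).length : Int) := by
  have hocc : (pvOcc G h).length
      = (pvSP G).countP (fun p => decide (pvCell h p.1 p.2 = "#")) := by
    rw [pvOcc, ← List.countP_eq_length_filter]
  rw [hocc, pvSP, pvSeatPos, countP_flatMap, cast_sum_nat]
  apply congrArg List.sum
  apply List.map_congr_left
  intro r hr
  rw [PySem.List.mem_pyRange_one] at hr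
  rw [List.countP_map, List.countP_filter, ← PySem.List.sum_map_ite_one_zero]
  have hrange : PySem.List.pyRange 0 (PySem.List.len (PySem.List.pyGetD G r []))
      = PySem.List.pyRange 0 (pvW G r) := by
    simp only [PySem.List.len_eq, pvW]
  rw [hrange]
  apply congrArg List.sum
  apply List.map_congr_left
  intro c hc
  rw [PySem.List.mem_pyRange_one] at hc
  by_cases hs : pvSeat G r c
  · have hx := (hSk.2 r c hr.1 hr.2 hc.1 hc.2).2 hs
    have hsd : decide (pvCell G r c = "L" ∨ pvCell G r c = "#") = true := by
      simpa [pvSeat] using hs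
    rcases hx with hL | hH
    · simp [Function.comp, indOcc, hL, hsd]
    · simp [Function.comp, indOcc, hH, hsd]
  · have hx := (hSk.2 r c hr.1 hr.2 hc.1 hc.2).1 hs
    have hnH : pvCell h r c ≠ "#" := by
      rw [hx]; intro hcon; exact hs (Or.inr hcon)
    have hsd : decide (pvCell G r c = "L" ∨ pvCell G r c = "#") = false := by
      simpa [pvSeat] using hs
    simp [Function.comp, indOcc, hnH, hsd]

theorem delta_occ {G g : List (List String)} (hPre : Pre_part_2 G) (hSk : pvSk G g) :
    gDelta g = ((pvOcc G (gStep g)).length : Int) - ((pvOcc G g).length : Int) := by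
  have hlen : g.length = G.length := sk_len hSk
  have hrange : gDelta g = ((PySem.List.pyRange 0 (pvR G)).map (fun r =>
      ((PySem.List.pyRange 0 (pvW G r)).map (fun c => dOcc g r c (pvCell g r c))).sum)).sum := by
    rw [gDelta, enum_map_sum g [] (fun j row => rowDelta g j row)]
    have hR : PySem.List.len g = pvR G := by simp [PySem.List.len, pvR, hlen]
    rw [hR]
    apply congrArg List.sum
    apply List.map_congr_left
    intro r hr
    rw [PySem.List.mem_pyRange_one] at hr
    rw [rowDelta, enum_map_sum _ "" (fun c x => dOcc g r c x)]
    rw [sk_width hSk hr.1 hr.2]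
    apply congrArg List.sum
    apply List.map_congr_left
    intro c hc
    simp [pvCell]
  rw [hrange]
  have hsplit : ∀ r ∈ PySem.List.pyRange 0 (pvR G),
      ((PySem.List.pyRange 0 (pvW G r)).map (fun c => dOcc g r c (pvCell g r c))).sum
        = ((PySem.List.pyRange 0 (pvW G r)).map (fun c => indOcc (pvCell (gStep g) r c))).sum
          - ((PySem.List.pyRange 0 (pvW G r)).map (fun c => indOcc (pvCell g r c))).sum := by
    intro r hr
    rw [PySem.List.mem_pyRange_one] at hr
    rw [← sum_map_sub_int]
    apply congrArg List.sum
    apply List.map_congr_left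
    intro c hc
    rw [PySem.List.mem_pyRange_one] at hc
    rw [dOcc_split]
    have hrn : r.toNat < g.length := by simp only [pvR] at hr; omega
    have hcc : c < ((g.getD r.toNat []).length : Int) := by
      rw [sk_row_len hSk r.toNat hrn]
      have : pvW G r = ((G.getD r.toNat []).length : Int) := by
        simp only [pvW, getD_int G hr.1]
      omega
    rw [cell_gStep g hr.1 (by simp only [pvR] at hr; omega) hc.1 hcc]
  rw [List.map_congr_left hsplit, sum_map_sub_int]
  rw [cnt_eq (sk_step hPre hSk), cnt_eq hSk]

-- ---------- step correspondence ----------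

theorem zip_map_self {α β : Type} (l : List α) (f : α → β) :
    l.zip (l.map f) = l.map (fun x => (x, f x)) := by
  induction l with
  | nil => rfl
  | cons x t ih => simp [ih]

theorem rayB_some_mem (s : List (Int × Int)) (R C dr dc : Int) :
    ∀ (fuel : Nat) (nr nc : Int) (q : Int × Int),
    pvRayB s R C dr dc fuel nr nc = some q → PySem.Set.contains s q = true := by
  intro fuel
  induction fuel with
  | zero => intro nr nc q h; simp [pvRayB] at h
  | succ fuel ih =>
    intro nr nc q h
    rw [pvRayB] at h
    by_cases hv : (0 ≤ nr ∧ nr < R ∧ 0 ≤ nc ∧ nc < C)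
    · rw [if_pos (by simpa using hv)] at h
      by_cases hm : PySem.Set.contains s (nr, nc) = true
      · rw [if_pos hm] at h
        cases h
        exact hm
      · rw [if_neg hm] at h
        exact ih _ _ _ h
    · rw [if_neg (by simpa using hv)] at h
      cases h

theorem mem_pvNbr {G : List (List String)} (p q : Int × Int)
    (h : q ∈ pvNbr (PySem.Set.ofList (pvSP G)) (pvR G) (pvC G) p) : q ∈ pvSP G := by
  rw [pvNbr_eq_filterMap] at h
  rw [List.mem_filterMap] at h
  obtain ⟨d, _, hray⟩ := h
  have := rayB_some_mem _ _ _ _ _ _ _ _ _ hray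
  simp only [PySem.Set.contains, List.contains_iff_mem] at this
  rwa [PySem.Set.mem_ofList] at this

theorem mem_occ_iff {G g : List (List String)} (p : Int × Int) (hp : p ∈ pvSP G) :
    p ∈ pvOcc G g ↔ pvCell g p.1 p.2 = "#" := by
  rw [pvOcc, List.mem_filter]
  simp [hp]

theorem stepB_eq {G g : List (List String)} (hPre : Pre_part_2 G) (hSk : pvSk G g) :
    pvStepB (pvSP G) (pvNb G) (pvOcc G g) = pvOcc G (gStep g) := by 
  rw [pvStepB, pvNb]
  rw [zip_map_self, List.foldl_map]
  have hbody : (fun (new : List (Int × Int)) (x : Int × Int) =>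
      (fun (new : List (Int × Int)) (pn : (Int × Int) × List (Int × Int)) =>
        let v : Int := ((pn.2.countP (fun q => PySem.Set.contains (PySem.Set.ofList (pvOcc G g)) q)) : Int)
        if (PySem.Set.contains (PySem.Set.ofList (pvOcc G g)) pn.1 ∧ v < 5) ∨
           (¬ (PySem.Set.contains (PySem.Set.ofList (pvOcc G g)) pn.1 = true) ∧ v = 0)
        then new ++ [pn.1] else new) new (x, pvNbr (PySem.Set.ofList (pvSP G)) (pvR G) (pvC G) x))
      = fun new x =>
        if (PySem.Set.contains (PySem.Set.ofList (pvOcc G g)) x ∧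
              (((pvNbr (PySem.Set.ofList (pvSP G)) (pvR G) (pvC G) x).countP
                (fun q => PySem.Set.contains (PySem.Set.ofList (pvOcc G g)) q) : Int)) < 5) ∨
           (¬ (PySem.Set.contains (PySem.Set.ofList (pvOcc G g)) x = true) ∧
              (((pvNbr (PySem.Set.ofList (pvSP G)) (pvR G) (pvC G) x).countP
                (fun q => PySem.Set.contains (PySem.Set.ofList (pvOcc G g)) q) : Int)) = 0)
        then new ++ [x] else new := by
    funext new x
    rfl
  rw [hbody]
  rw [PySem.List.foldl_append_ite_eq_filter]
  rw [List.nil_append]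
  show (pvSP G).filter _ = (pvSP G).filter _
  apply List.filter_congr
  intro p hp
  apply decide_eq_decide.mpr
  obtain ⟨hr0, hrR, hc0, hcC, hseat⟩ := (mem_SP G p).mp hp
  have hcont : ∀ q : Int × Int, q ∈ pvSP G →
      (PySem.Set.contains (PySem.Set.ofList (pvOcc G g)) q = true ↔ pvCell g q.1 q.2 = "#") := by
    intro q hq
    simp only [PySem.Set.contains, List.contains_iff_mem, PySem.Set.mem_ofList]
    rw [mem_occ_iff q hq]
  have hvc : (((pvNbr (PySem.Set.ofList (pvSP G)) (pvR G) (pvC G) p).countP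
      (fun q => PySem.Set.contains (PySem.Set.ofList (pvOcc G g)) q) : Int)) = pvVC g p.1 p.2 := by
    rw [vc_eq hPre hSk p hp]
    congr 1
    apply List.countP_congr
    intro q hq
    have hqs := mem_pvNbr p q hq
    have hiff := hcont q hqs
    by_cases hx : pvCell g q.1 q.2 = "#"
    · simp only [hx, decide_true]
      exact iff_of_true (hiff.mpr hx) trivial
    · simp only [hx, decide_false]
      by_cases hcb : (PySem.Set.ofList (pvOcc G g)).contains q = true
      · exact absurd (hiff.mp hcb) hx
      · exact iff_of_false hcb (by simp)
  rw [hvc, hcont p hp]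
  have hcc : p.2 < ((g.getD p.1.toNat []).length : Int) := by
    rw [sk_row_len hSk p.1.toNat (by have := sk_len hSk; simp only [pvR] at hrR; omega)]
    have : pvW G p.1 = ((G.getD p.1.toNat []).length : Int) := by
      simp only [pvW, getD_int G hr0]
    omega
  rw [cell_gStep g hr0 (by have := sk_len hSk; simp only [pvR] at hrR ⊢; omega) hc0 hcc]
  rcases (hSk.2 p.1 p.2 hr0 hrR hc0 hcC).2 hseat with hL | hH
  · rw [hL]
    have hnc : nCell g p.1 p.2 "L" = (if pvVC g p.1 p.2 = 0 then "#" else "L") := by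
      simp [nCell]
    rw [hnc]
    by_cases hv : pvVC g p.1 p.2 = 0
    · rw [if_pos hv]
      exact iff_of_true (Or.inr ⟨by decide, hv⟩) rfl
    · rw [if_neg hv]
      apply iff_of_false
      · rintro (⟨hc, _⟩ | ⟨_, hz⟩)
        · exact absurd hc (by decide)
        · exact hv hz
      · decide
  · rw [hH]
    have hnc : nCell g p.1 p.2 "#" = (if pvVC g p.1 p.2 ≥ 5 then "L" else "#") := by
      simp [nCell]
    rw [hnc]
    by_cases hv : pvVC g p.1 p.2 ≥ 5
    · rw [if_pos hv]
      apply iff_of_false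
      · rintro (⟨_, hlt⟩ | ⟨hnc', _⟩)
        · omega
        · exact hnc' rfl
      · decide
    · rw [if_neg hv]
      exact iff_of_true (Or.inl ⟨rfl, by omega⟩) rfl

theorem occ_ne {G g : List (List String)} (hPre : Pre_part_2 G) (hSk : pvSk G g)
    (hch : gCh g = true) : pvOcc G (gStep g) ≠ pvOcc G g := by 
  rw [gCh, List.any_eq_true] at hch
  obtain ⟨p, hpmem, hrow⟩ := hch
  rw [PySem.List.mem_enumerate_iff] at hpmem
  obtain ⟨k, hk, rfl⟩ := hpmem
  rw [rowCh, List.any_eq_true] at hrow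
  obtain ⟨q, hqmem, hfire⟩ := hrow
  rw [PySem.List.mem_enumerate_iff] at hqmem
  obtain ⟨j, hj, rfl⟩ := hqmem
  simp only [decide_eq_true_eq, zero_add] at hfire hj ⊢
  have hlen : g.length = G.length := sk_len hSk
  have hk0 : (0:Int) ≤ (k : Int) := Int.natCast_nonneg _
  have hj0 : (0:Int) ≤ (j : Int) := Int.natCast_nonneg _
  have hrR : ((k : Nat) : Int) < pvR G := by simp only [pvR]; omega
  have hrowg : g.getD k [] = g[k] := List.getD_eq_getElem g [] hk
  have hjlen : j < (g.getD k []).length := by rw [hrowg]; exact hj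
  have hcC : ((j : Nat) : Int) < pvW G (k : Int) := by
    have := sk_row_len hSk k hk
    have hW : pvW G ((k : Nat) : Int) = ((G.getD k []).length : Int) := by
      simp only [pvW, getD_int G hk0, Int.toNat_natCast]
    omega
  have hcellg : pvCell g (k : Int) (j : Int) = g[k][j] := by
    rw [cell_int g hk0 hj0]
    simp only [Int.toNat_natCast]
    rw [hrowg, List.getD_eq_getElem _ _ hj]
  have hfire' : nCell g (k : Int) (j : Int) (pvCell g (k : Int) (j : Int)) ≠ pvCell g (k : Int) (j : Int) := by
    rw [hcellg]
    exact hfire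
  have hseat : pvSeat G (k : Int) (j : Int) := by
    by_contra hns
    have hx := (hSk.2 (k : Int) (j : Int) hk0 hrR hj0 hcC).1 hns
    have hnL : pvCell g (k : Int) (j : Int) ≠ "L" := by
      rw [hx]; intro hcon; exact hns (Or.inl hcon)
    have hnH : pvCell g (k : Int) (j : Int) ≠ "#" := by
      rw [hx]; intro hcon; exact hns (Or.inr hcon)
    apply hfire'
    rw [nCell, if_neg (by rintro ⟨hh, _⟩; exact hnL hh), if_neg (by rintro ⟨hh, _⟩; exact hnH hh)]
  have hp : ((k : Int), (j : Int)) ∈ pvSP G := (mem_SP G _).mpr ⟨hk0, hrR, hj0, hcC, hseat⟩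
  have hcellstep : pvCell (gStep g) (k : Int) (j : Int)
      = nCell g (k : Int) (j : Int) (pvCell g (k : Int) (j : Int)) := by
    apply cell_gStep g hk0 (by omega) hj0
    simp only [Int.toNat_natCast]
    omega
  intro heq
  rcases (hSk.2 (k : Int) (j : Int) hk0 hrR hj0 hcC).2 hseat with hL | hH
  · -- empty seat fills: it enters the occupied list
    have hv : pvVC g (k : Int) (j : Int) = 0 := by
      by_contra hv
      apply hfire'
      rw [hL, nCell]
      rw [if_neg (by rintro ⟨_, hh⟩; exact hv hh), if_neg (by rintro ⟨hh, _⟩; exact absurd hh (by decide))]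
    have hin : ((k : Int), (j : Int)) ∈ pvOcc G (gStep g) := by
      rw [mem_occ_iff _ hp, hcellstep, hL, nCell, if_pos ⟨rfl, hv⟩]
    have hout : ((k : Int), (j : Int)) ∉ pvOcc G g := by
      rw [mem_occ_iff _ hp, hL]
      decide
    rw [heq] at hin
    exact hout hin
  · -- occupied seat empties: it leaves the occupied list
    have hv : pvVC g (k : Int) (j : Int) ≥ 5 := by
      by_contra hv
      apply hfire'
      rw [hH, nCell]
      rw [if_neg (by rintro ⟨hh, _⟩; exact absurd hh (by decide)), if_neg (by rintro ⟨_, hh⟩; exact hv hh)]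
    have hin : ((k : Int), (j : Int)) ∈ pvOcc G g := by
      rw [mem_occ_iff _ hp, hH]
    have hout : ((k : Int), (j : Int)) ∉ pvOcc G (gStep g) := by
      rw [mem_occ_iff _ hp, hcellstep, hH, nCell]
      rw [if_neg (by rintro ⟨hh, _⟩; exact absurd hh (by decide)), if_pos ⟨rfl, hv⟩]
      decide
    rw [heq] at hout
    exact hout hin
  

-- ---------- the outer loops in lockstep ----------

theorem loop_eq {G : List (List String)} (hPre : Pre_part_2 G) :
    ∀ (fuel : Nat) (g : List (List String)) (total : Int), pvSk G g →
    pvLoopA fuel g g total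
      = total + ((pvLoopB (pvSP G) (pvNb G) fuel (pvOcc G g)).length : Int)
          - ((pvOcc G g).length : Int) := by 
  intro fuel
  induction fuel with
  | zero =>
    intro g total hSkg
    show total = total + (((pvOcc G g).length : Int)) - ((pvOcc G g).length : Int)
    ring
  | succ fuel ih =>
    intro g total hSkg
    rw [pvLoopA, pvLoopB]
    rw [passA_step g total false, stepB_eq hPre hSkg]
    by_cases hch : gCh g = true
    · have hne : pvOcc G (gStep g) ≠ pvOcc G g := occ_ne hPre hSkg hch
      rw [if_neg hne]
      have hcond : ((gStep g, total + gDelta g, false || gCh g).2.2 = true) := by simp [hch]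
      rw [if_pos hcond]
      show pvLoopA fuel (gStep g) (gStep g) (total + gDelta g) = _
      rw [ih (gStep g) (total + gDelta g) (sk_step hPre hSkg)]
      rw [delta_occ hPre hSkg]
      ring
    · have hch' : gCh g = false := by simpa using hch
      have hstep : gStep g = g := (gCh_false_iff g).mp hch'
      have hcond : ¬ ((gStep g, total + gDelta g, false || gCh g).2.2 = true) := by simp [hch']
      rw [if_neg hcond]
      rw [hstep]
      rw [if_pos rfl]
      show total + gDelta g = _
      rw [delta_occ hPre hSkg, hstep]
      ring
  

theorem alt_eq (G : List (List String)) :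
    part_2_alt G = ((pvLoopB (pvSP G) (pvNb G) (2 ^ pvCells G + 1) (pvOcc G G)).length : Int)
      - ((pvOcc G G).length : Int) := by 
  cases G <;> rfl
  


-- ===== VERDICT (by name: the statement is the Claim_ definition above) =====
theorem part_2_spec : Claim_equal_part_2 := by
  intro G _hDom hPre
  unfold Spec_part_2
  rw [alt_eq]
  show pvLoopA (2 ^ pvCells G + 1) G G 0 = _
  rw [loop_eq hPre (2 ^ pvCells G + 1) G 0 (sk_refl G)]
  ring
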